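-- pv_equiv track=rewrite | github.com/Tomakko/logseq_rag | src/logseq_parser.py | get_downwards_hirarchy_pointers
-- ===== SOURCE A (Python) =====
-- def get_downwards_hirarchy_pointers(hirarchy_levels):
--     all_pointers = [] # array of arrays
--     for i in range(len(hirarchy_levels)):
--         h = hirarchy_levels[i]
--         pointers = [] # pointers for curent element
--         for j in range(i+1, len(hirarchy_levels)):
--             # as long as hirarchy level is larger append indices
--             if hirarchy_levels[j] > h:
--                 pointers.append(j)
--             else:
--                 break
--         all_pointers.append(pointers)
--
--     return all_pointers
-- ===== SOURCE B (Python) =====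
-- def get_downwards_hirarchy_pointers(hirarchy_levels):
--     # One monotonic-stack pass: end[i] = first j > i with level[j] <= level[i] (or n);
--     # each pointer list is then the contiguous index run [i+1, end[i]).
--     n = len(hirarchy_levels)
--     end = [n] * n
--     stack = []
--     for j in range(n):
--         h = hirarchy_levels[j]
--         while stack and hirarchy_levels[stack[-1]] >= h:
--             end[stack.pop()] = j
--         stack.append(j)
--     return [list(range(i + 1, end[i])) for i in range(n)]
-- ===== Notes on version B (the rewrite author's own statement) =====
-- stated objective: alternative
-- what changed: Replaced the nested per-element break-scan with a single monotonic-stack pass that computes each element's run endpoint, then materialises every pointer list as the contiguous range(i+1, end[i]); on the timing family the output itself is quadratic in size, so no asymptotic speedup was measured.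
import Mathlib
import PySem

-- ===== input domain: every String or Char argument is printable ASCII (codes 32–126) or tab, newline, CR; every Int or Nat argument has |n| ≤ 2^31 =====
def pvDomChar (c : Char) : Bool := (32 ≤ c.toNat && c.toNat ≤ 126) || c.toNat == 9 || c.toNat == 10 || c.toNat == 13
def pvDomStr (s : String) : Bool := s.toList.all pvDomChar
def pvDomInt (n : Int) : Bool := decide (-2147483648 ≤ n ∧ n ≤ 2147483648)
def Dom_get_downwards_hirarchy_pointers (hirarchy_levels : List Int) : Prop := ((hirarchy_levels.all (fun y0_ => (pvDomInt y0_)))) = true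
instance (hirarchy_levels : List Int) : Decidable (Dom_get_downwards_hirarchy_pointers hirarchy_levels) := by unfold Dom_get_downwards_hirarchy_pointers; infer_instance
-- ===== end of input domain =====

-- B replaces A's nested per-element scan by one monotonic-stack pass computing each
-- run's endpoint, then materialises the contiguous index runs (alternative algorithm).

-- ===== PORT A =====
-- inner loop of A: for j in range(j0, n): if levels[j] > h: append j else: break
def innerA (levels : List Int) (h : Int) (j : Nat) : List Int :=
  if hj : j < levels.length then
    if h < levels.getD j 0 then Int.ofNat j :: innerA levels h (j + 1) else []
  else []
termination_by levels.length - j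

def get_downwards_hirarchy_pointers (hirarchy_levels : List Int) : List (List Int) :=
  (List.range hirarchy_levels.length).map
    (fun i => innerA hirarchy_levels (hirarchy_levels.getD i 0) (i + 1))

-- ===== PORT B =====
-- the `while stack and levels[stack[-1]] >= h: end[stack.pop()] = j` loop
def popB (levels : List Int) (j : Nat) : List Nat → List Nat → List Nat × List Nat
  | [], ends => ([], ends)
  | t :: s, ends =>
      if levels.getD j 0 ≤ levels.getD t 0 then popB levels j s (ends.set t j)
      else (t :: s, ends)

-- one iteration of the `for j in range(n)` loop: pop, then push j
def stepB (levels : List Int) (st : List Nat × List Nat) (j : Nat) : List Nat × List Nat :=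
  let r := popB levels j st.1 st.2
  (j :: r.1, r.2)

def get_downwards_hirarchy_pointers_alt (hirarchy_levels : List Int) : List (List Int) :=
  let n := hirarchy_levels.length
  let ends := ((List.range n).foldl (stepB hirarchy_levels) ([], List.replicate n n)).2
  (List.range n).map (fun i => (List.range' (i + 1) (ends.getD i 0 - (i + 1))).map (fun k => Int.ofNat k))

-- ===== PRECONDITION & SPEC =====
def Spec_get_downwards_hirarchy_pointers (hirarchy_levels : List Int) (out : List (List Int)) : Prop := out = get_downwards_hirarchy_pointers_alt hirarchy_levels
instance (hirarchy_levels : List Int) (out : List (List Int)) : Decidable (Spec_get_downwards_hirarchy_pointers hirarchy_levels out) := by unfold Spec_get_downwards_hirarchy_pointers; infer_instance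

-- ===== CLAIM (what is proved, stated in full; the proofs are below) =====
def Claim_equal_get_downwards_hirarchy_pointers : Prop := ∀ (hirarchy_levels : List Int), Dom_get_downwards_hirarchy_pointers hirarchy_levels → Spec_get_downwards_hirarchy_pointers hirarchy_levels (get_downwards_hirarchy_pointers hirarchy_levels)

-- ===== LEMMAS AND PROOFS =====

-- spec intermediary: first index k ≥ j with levels[k] ≤ hi, else levels.length
def fe (levels : List Int) (hi : Int) (j : Nat) : Nat :=
  if hj : j < levels.length then
    if levels.getD j 0 ≤ hi then j else fe levels hi (j + 1)
  else levels.length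
termination_by levels.length - j

theorem fe_ge (levels : List Int) (hi : Int) :
    ∀ d j, levels.length - j = d → j ≤ levels.length → j ≤ fe levels hi j := by
  intro d
  induction d with
  | zero =>
    intro j hd hj
    have : j = levels.length := by omega
    subst this
    rw [fe]; simp
  | succ d ih =>
    intro j hd hj
    have hjn : j < levels.length := by omega
    rw [fe, dif_pos hjn]
    split
    · exact le_refl j
    · exact le_trans (by omega) (ih (j + 1) (by omega) (by omega))

theorem fe_found (levels : List Int) (hi : Int) (m : Nat)
    (hm : m < levels.length) (hlm : levels.getD m 0 ≤ hi) :
    ∀ d j, m - j = d → j ≤ m → (∀ k, j ≤ k → k < m → hi < levels.getD k 0) →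
      fe levels hi j = m := by
  intro d
  induction d with
  | zero =>
    intro j hd hj _
    have : j = m := by omega
    subst this
    rw [fe, dif_pos hm, if_pos hlm]
  | succ d ih =>
    intro j hd hj hk
    have hjm : j < m := by omega
    have hjn : j < levels.length := by omega
    have hgt : hi < levels.getD j 0 := hk j (le_refl j) hjm
    rw [fe, dif_pos hjn, if_neg (by omega)]
    exact ih (j + 1) (by omega) (by omega) (fun k h1 h2 => hk k (by omega) h2)

theorem fe_all (levels : List Int) (hi : Int) :
    ∀ d j, levels.length - j = d →
      (∀ k, j ≤ k → k < levels.length → hi < levels.getD k 0) →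
      fe levels hi j = levels.length := by
  intro d
  induction d with
  | zero =>
    intro j hd _
    rw [fe, dif_neg (by omega)]
  | succ d ih =>
    intro j hd hk
    have hjn : j < levels.length := by omega
    have hgt : hi < levels.getD j 0 := hk j (le_refl j) hjn
    rw [fe, dif_pos hjn, if_neg (by omega)]
    exact ih (j + 1) (by omega) (fun k h1 h2 => hk k (by omega) h2)

theorem innerA_eq (levels : List Int) (h : Int) :
    ∀ d j, levels.length - j = d →
      innerA levels h j = (List.range' j (fe levels h j - j)).map (fun k => Int.ofNat k) := by
  intro d
  induction d with
  | zero =>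
    intro j hd
    rw [innerA, dif_neg (by omega), fe, dif_neg (by omega)]
    have : levels.length - j = 0 := by omega
    rw [this]
    simp
  | succ d ih =>
    intro j hd
    have hjn : j < levels.length := by omega
    rw [innerA, dif_pos hjn, fe, dif_pos hjn]
    by_cases hc : h < levels.getD j 0
    · rw [if_pos hc, if_neg (by omega)]
      have hge : j + 1 ≤ fe levels h (j + 1) :=
        fe_ge levels h (levels.length - (j + 1)) (j + 1) rfl (by omega)
      have hsub : fe levels h (j + 1) - j = (fe levels h (j + 1) - (j + 1)) + 1 := by omega
      rw [hsub, List.range'_succ, List.map_cons, ih (j + 1) (by omega)]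
    · rw [if_neg hc, if_pos (by omega)]
      simp

-- invariant of the B fold after processing indices 0..j-1
def InvB (levels : List Int) (j : Nat) (stack ends : List Nat) : Prop :=
  ends.length = levels.length ∧
  (∀ i ∈ stack, i < j ∧ ∀ k, i < k → k < j → levels.getD i 0 < levels.getD k 0) ∧
  stack.Pairwise (fun a b => b < a ∧ levels.getD b 0 < levels.getD a 0) ∧
  (∀ i, i < levels.length → i < j → i ∉ stack →
      ends.getD i 0 = fe levels (levels.getD i 0) (i + 1)) ∧
  (∀ i, i < levels.length → (j ≤ i ∨ i ∈ stack) → ends.getD i 0 = levels.length)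

theorem getD_set_self (l : List Nat) (t v : Nat) (ht : t < l.length) :
    (l.set t v).getD t 0 = v := by
  simp [List.getD, ht]

theorem getD_set_ne (l : List Nat) (t v i : Nat) (h : t ≠ i) :
    (l.set t v).getD i 0 = l.getD i 0 := by
  simp [List.getD, List.getElem?_set_ne h]

theorem pop_inv (levels : List Int) (j : Nat) (hj : j < levels.length) :
    ∀ stack ends, InvB levels j stack ends →
      InvB levels (j + 1) (j :: (popB levels j stack ends).1) (popB levels j stack ends).2 := by
  intro stack
  induction stack with
  | nil =>
    intro ends hinv
    obtain ⟨hlen, hS1, _, hfe, hn⟩ := hinv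
    refine ⟨hlen, ?_, ?_, ?_, ?_⟩
    · intro i hi
      simp [popB] at hi
      subst hi
      exact ⟨by omega, fun k h1 h2 => by omega⟩
    · simp [popB]
    · intro i hin hij hns
      simp [popB] at hns
      exact hfe i hin (by omega) (by simp)
    · intro i hin hcase
      simp [popB] at hcase
      exact hn i hin (Or.inl (by omega))
  | cons t s ih =>
    intro ends hinv
    obtain ⟨hlen, hS1, hpw, hfe, hn⟩ := hinv
    obtain ⟨htj, hgap⟩ := hS1 t (by simp)
    have hpw' := List.pairwise_cons.mp hpw
    have hts : t ∉ s := fun hmem => by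
      have := hpw'.1 t hmem; omega
    by_cases hc : levels.getD j 0 ≤ levels.getD t 0
    · -- pop t: set ends[t] := j, continue with s
      have hpop : popB levels j (t :: s) ends = popB levels j s (ends.set t j) := by
        simp only [popB]
        rw [if_pos hc]
      have hfet : fe levels (levels.getD t 0) (t + 1) = j :=
        fe_found levels (levels.getD t 0) j hj hc (j - (t + 1)) (t + 1) rfl (by omega)
          (fun k h1 h2 => hgap k (by omega) h2)
      have hnext : InvB levels j s (ends.set t j) := by
        refine ⟨by simp [hlen], ?_, hpw'.2, ?_, ?_⟩
        · intro i hi; exact hS1 i (by simp [hi])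
        · intro i hin hij hns
          by_cases hit : i = t
          · subst hit
            rw [getD_set_self ends i j (by omega)]
            exact hfet.symm
          · rw [getD_set_ne ends t j i (fun h => hit h.symm)]
            exact hfe i hin hij (by simp [hns, hit])
        · intro i hin hcase
          have hit : t ≠ i := by
            rcases hcase with h | h
            · omega
            · exact fun he => hts (he ▸ h)
          rw [getD_set_ne ends t j i hit]
          rcases hcase with h | h
          · exact hn i hin (Or.inl h)
          · exact hn i hin (Or.inr (by simp [h]))
      rw [hpop]
      exact ih (ends.set t j) hnext
    · -- stop: stack unchanged, push j
      have hlt : levels.getD t 0 < levels.getD j 0 := by omega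
      have hpop : popB levels j (t :: s) ends = (t :: s, ends) := by
        simp only [popB]
        rw [if_neg hc]
      rw [hpop]
      refine ⟨hlen, ?_, ?_, ?_, ?_⟩
      · intro i hi
        simp at hi
        rcases hi with h | h | h
        · subst h; exact ⟨by omega, fun k h1 h2 => by omega⟩
        · subst h
          refine ⟨by omega, fun k h1 h2 => ?_⟩
          by_cases hkj : k = j
          · subst hkj; exact hlt
          · exact hgap k h1 (by omega)
        · obtain ⟨hij, hg⟩ := hS1 i (by simp [h])
          refine ⟨by omega, fun k h1 h2 => ?_⟩
          by_cases hkj : k = j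
          · subst hkj
            have := (hpw'.1 i h).2
            omega
          · exact hg k h1 (by omega)
      · refine List.pairwise_cons.mpr ⟨?_, hpw⟩
        intro b hb
        simp at hb
        rcases hb with h | h
        · subst h; exact ⟨htj, hlt⟩
        · have h1 := hpw'.1 b h
          obtain ⟨hbj, _⟩ := hS1 b (by simp [h])
          exact ⟨by omega, by omega⟩
      · intro i hin hij hns
        simp at hns
        exact hfe i hin (by omega) (by simp [hns.2.1, hns.2.2])
      · intro i hin hcase
        rcases hcase with h | h
        · exact hn i hin (Or.inl (by omega))
        · simp at h
          rcases h with h | h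
          · exact hn i hin (Or.inl (by omega))
          · exact hn i hin (Or.inr (by simpa using h))

theorem fold_inv (levels : List Int) :
    ∀ m, m ≤ levels.length →
      InvB levels m
        ((List.range m).foldl (stepB levels) ([], List.replicate levels.length levels.length)).1
        ((List.range m).foldl (stepB levels) ([], List.replicate levels.length levels.length)).2 := by
  intro m
  induction m with
  | zero =>
    intro _
    refine ⟨by simp, by simp, by simp, by omega, ?_⟩
    intro i hin _
    simp [List.getD, hin]
  | succ m ih =>
    intro hm
    have hinv := ih (by omega)
    rw [List.range_succ, List.foldl_append, List.foldl_cons, List.foldl_nil]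
    exact pop_inv levels m (by omega) _ _ hinv

theorem ends_eq (levels : List Int) (i : Nat) (hi : i < levels.length) :
    ((List.range levels.length).foldl (stepB levels)
      ([], List.replicate levels.length levels.length)).2.getD i 0
      = fe levels (levels.getD i 0) (i + 1) := by
  obtain ⟨hlen, hS1, _, hfe, hn⟩ := fold_inv levels levels.length (le_refl _)
  by_cases hmem : i ∈ ((List.range levels.length).foldl (stepB levels)
      ([], List.replicate levels.length levels.length)).1
  · obtain ⟨_, hgap⟩ := hS1 i hmem
    rw [hn i hi (Or.inr hmem)]
    exact (fe_all levels (levels.getD i 0) (levels.length - (i + 1)) (i + 1) rfl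
      (fun k h1 h2 => hgap k (by omega) h2)).symm
  · exact hfe i hi hi hmem

-- ===== VERDICT (by name: the statement is the Claim_ definition above) =====
theorem get_downwards_hirarchy_pointers_spec : Claim_equal_get_downwards_hirarchy_pointers := by
  intro levels _
  unfold Spec_get_downwards_hirarchy_pointers
  unfold get_downwards_hirarchy_pointers get_downwards_hirarchy_pointers_alt
  apply List.map_congr_left
  intro i hi
  rw [List.mem_range] at hi
  rw [ends_eq levels i hi]
  exact innerA_eq levels (levels.getD i 0) (levels.length - (i + 1)) (i + 1) rfl
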